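-- pv_equiv track=rewrite | github.com/Figeiron/rozklad_pybot | ProcessData.py | insert_dividers
-- ===== SOURCE A (Python) =====
-- def insert_dividers(data, group ,drivers):
--     divider = '**====================================**'
--     lines = data.split('\n')
--     result_with_dividers = ''
--     driver_index = 0
--     count = 0
--     for line in lines:
--         result_with_dividers += line + '\n'
--         count += 1
--         if driver_index < len(drivers) and count == drivers[driver_index]:
--             result_with_dividers += divider + '\n'
--             driver_index += 1
--             count = 0
--
--     return f"{group}\n {divider}\n" + result_with_dividers
-- ===== SOURCE B (Python) =====
-- def insert_dividers(data, group, drivers):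
--     divider = '**====================================**'
--     rest = data.split('\n')
--     parts = []
--     for d in drivers:
--         if d <= 0 or d > len(rest):
--             break
--         chunk, rest = rest[:d], rest[d:]
--         parts.append(''.join(line + '\n' for line in chunk))
--         parts.append(divider + '\n')
--     parts.append(''.join(line + '\n' for line in rest))
--     return f"{group}\n {divider}\n" + ''.join(parts)
-- ===== Notes on version B (the rewrite author's own statement) =====
-- stated objective: alternative
-- what changed: A walks every line with a running counter and a driver index, resetting the counter at each divider; B instead consumes the line list chunk-by-chunk, slicing off the next d lines per driver (stopping at a non-positive or too-large driver) and joining the emitted parts at the end.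
import Mathlib
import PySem

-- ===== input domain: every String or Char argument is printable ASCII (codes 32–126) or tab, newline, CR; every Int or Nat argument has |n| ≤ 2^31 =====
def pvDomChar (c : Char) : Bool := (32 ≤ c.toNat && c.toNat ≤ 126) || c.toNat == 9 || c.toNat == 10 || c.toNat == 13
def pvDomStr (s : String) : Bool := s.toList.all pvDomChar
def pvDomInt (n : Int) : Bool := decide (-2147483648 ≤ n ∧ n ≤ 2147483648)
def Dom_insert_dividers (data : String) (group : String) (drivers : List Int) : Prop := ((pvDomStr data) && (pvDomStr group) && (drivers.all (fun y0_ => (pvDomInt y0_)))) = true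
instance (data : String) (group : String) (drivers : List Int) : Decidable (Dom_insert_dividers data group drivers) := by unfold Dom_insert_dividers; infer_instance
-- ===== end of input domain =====

-- B re-implements A by slicing the line list into driver-sized chunks (a counter-free decomposition);
-- equal return value proved on all inputs (A is total); objective: alternative decomposition, not speed.

-- ===== PORT A =====
-- divider = '**====================================**'  (same literal in both Pythons)
def pvDivider : List Char := "**====================================**".toList

-- the for-loop of A: state = (accumulated result, driver_index, count), one step per line
def pvLoopA (drivers : List Int) : List (List Char) → List Char → Nat → Int → List Char
  | [], res, _, _ => res
  | l :: ls, res, di, count =>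
    let res' := res ++ l ++ ['\n']
    let count' := count + 1
    if di < drivers.length ∧ count' = drivers.getD di 0 then
      pvLoopA drivers ls (res' ++ pvDivider ++ ['\n']) (di + 1) 0
    else
      pvLoopA drivers ls res' di count'

def insert_dividers (data : String) (group : String) (drivers : List Int) : String :=
  let lines := PySem.Chars.splitOn data.toList ['\n']
  String.ofList (group.toList ++ ['\n', ' '] ++ pvDivider ++ ['\n'] ++ pvLoopA drivers lines [] 0 0)

-- ===== PORT B =====
-- ''.join(line + '\n' for line in chunk)
def pvJoinNL : List (List Char) → List Char
  | [] => []
  | l :: ls => (l ++ ['\n']) ++ pvJoinNL ls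

-- the for-loop of B: consume one chunk of `rest` per driver, emitting the parts list
def pvLoopB : List Int → List (List Char) → List (List Char)
  | [], rest => [pvJoinNL rest]
  | d :: ds, rest =>
    if d ≤ 0 ∨ (rest.length : Int) < d then
      [pvJoinNL rest]
    else
      pvJoinNL (PySem.List.slice rest none (some d)) :: (pvDivider ++ ['\n']) ::
        pvLoopB ds (PySem.List.slice rest (some d) none)

def insert_dividers_alt (data : String) (group : String) (drivers : List Int) : String :=
  let rest := PySem.Chars.splitOn data.toList ['\n']
  String.ofList (group.toList ++ ['\n', ' '] ++ pvDivider ++ ['\n'] ++ (pvLoopB drivers rest).flatten)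

-- ===== PRECONDITION & SPEC =====
def Spec_insert_dividers (data : String) (group : String) (drivers : List Int) (out : String) : Prop := out = insert_dividers_alt data group drivers
instance (data : String) (group : String) (drivers : List Int) (out : String) : Decidable (Spec_insert_dividers data group drivers out) := by unfold Spec_insert_dividers; infer_instance

-- ===== CLAIM (what is proved, stated in full; the proofs are below) =====
def Claim_equal_insert_dividers : Prop := ∀ (data : String) (group : String) (drivers : List Int), Dom_insert_dividers data group drivers → Spec_insert_dividers data group drivers (insert_dividers data group drivers)

-- ===== LEMMAS AND PROOFS =====

-- once driver_index has run off the end of drivers, A just appends every remaining line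
lemma pvLoopA_exhausted (full : List Int) :
    ∀ (lines : List (List Char)) acc di c, full.length ≤ di →
      pvLoopA full lines acc di c = acc ++ pvJoinNL lines := by
  intro lines
  induction lines with
  | nil => intro acc di c _; simp [pvLoopA, pvJoinNL]
  | cons l ls ih =>
    intro acc di c h
    rw [pvLoopA]
    rw [if_neg (by simp; intro hlt; omega)]
    rw [ih _ _ _ h]
    simp [pvJoinNL]

-- a blocked driver (already passed, or unreachable within the remaining lines) never fires again
lemma pvLoopA_blocked (full : List Int) (di : Nat) (d : Int) (hget : full.getD di 0 = d) :
    ∀ (lines : List (List Char)) acc (c : Int), (d ≤ c ∨ (c : Int) + lines.length < d) →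
      pvLoopA full lines acc di c = acc ++ pvJoinNL lines := by
  intro lines
  induction lines with
  | nil => intro acc c _; simp [pvLoopA, pvJoinNL]
  | cons l ls ih =>
    intro acc c hc
    rw [pvLoopA]
    rw [if_neg (by
      rintro ⟨-, heq⟩
      rw [hget] at heq
      simp at hc
      rcases hc with h | h <;> omega)]
    rw [ih _ _ (by simp only [List.length_cons] at hc; push_cast at hc ⊢; omega)]
    simp [pvJoinNL]

-- an active driver d consumes exactly the next (d - c) lines and emits one divider
lemma pvLoopA_chunk (full : List Int) (di : Nat) (d : Int)
    (hdi : di < full.length) (hget : full.getD di 0 = d) :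
    ∀ (k : Nat) (lines : List (List Char)) acc (c : Int), c + k = d → 1 ≤ k → k ≤ lines.length →
      pvLoopA full lines acc di c =
        pvLoopA full (lines.drop k) (acc ++ pvJoinNL (lines.take k) ++ pvDivider ++ ['\n']) (di + 1) 0 := by
  intro k
  induction k with
  | zero => intro _ _ _ _ h; omega
  | succ k ih =>
    intro lines acc c hc _ hlen
    match lines with
    | [] => simp at hlen
    | l :: ls =>
      rw [pvLoopA]
      by_cases hk : k = 0
      · subst hk
        rw [if_pos ⟨hdi, by rw [hget]; omega⟩]
        simp [pvJoinNL]
      · rw [if_neg (by rintro ⟨-, heq⟩; rw [hget] at heq; omega)]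
        rw [ih ls (acc ++ l ++ ['\n']) (c + 1) (by omega) (by omega) (by simpa using hlen)]
        simp [pvJoinNL]

-- main invariant: A's counter loop, started at driver_index di with count 0, produces B's chunks
lemma pvLoopA_eq_loopB (full : List Int) :
    ∀ (ds : List Int) (lines : List (List Char)) acc (di : Nat), full.drop di = ds →
      pvLoopA full lines acc di 0 = acc ++ (pvLoopB ds lines).flatten := by
  intro ds
  induction ds with
  | nil =>
    intro lines acc di hdrop
    have hlen : full.length ≤ di := by
      have := congrArg List.length hdrop
      simp at this; omega
    rw [pvLoopA_exhausted full lines acc di 0 hlen]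
    simp [pvLoopB]
  | cons d ds ih =>
    intro lines acc di hdrop
    have hdi : di < full.length := by
      by_contra h
      rw [List.drop_eq_nil_of_le (by omega)] at hdrop
      exact (List.cons_ne_nil d ds) hdrop.symm
    have hget : full.getD di 0 = d := by
      have h := congrArg (fun l => l.getD 0 0) hdrop
      simpa [List.getD_eq_getElem?_getD, List.getElem?_drop] using h
    have hdrop' : full.drop (di + 1) = ds := by
      have : full.drop (di + 1) = (full.drop di).drop 1 := by
        rw [List.drop_drop]
      rw [this, hdrop]; rfl
    by_cases hblk : d ≤ 0 ∨ (lines.length : Int) < d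
    · rw [pvLoopA_blocked full di d hget lines acc 0 (by rcases hblk with h | h; exacts [Or.inl h, Or.inr (by omega)])]
      rw [pvLoopB, if_pos hblk]
      simp
    · simp only [not_or, not_le, not_lt] at hblk
      obtain ⟨hpos, hle⟩ := hblk
      have hk1 : 1 ≤ d.toNat := by omega
      have hk2 : d.toNat ≤ lines.length := by omega
      rw [pvLoopA_chunk full di d hdi hget d.toNat lines acc 0 (by omega) hk1 hk2]
      rw [ih (lines.drop d.toNat) _ (di + 1) hdrop']
      rw [pvLoopB, if_neg (by rintro (h | h) <;> omega)]
      rw [PySem.List.slice_to lines hpos.le, PySem.List.slice_from lines hpos.le]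
      simp

-- ===== VERDICT (by name: the statement is the Claim_ definition above) =====
theorem insert_dividers_spec : Claim_equal_insert_dividers := by
  intro data group drivers _
  unfold Spec_insert_dividers
  show String.ofList (group.toList ++ ['\n', ' '] ++ pvDivider ++ ['\n'] ++
      pvLoopA drivers (PySem.Chars.splitOn data.toList ['\n']) [] 0 0) =
    String.ofList (group.toList ++ ['\n', ' '] ++ pvDivider ++ ['\n'] ++
      (pvLoopB drivers (PySem.Chars.splitOn data.toList ['\n'])).flatten)
  rw [pvLoopA_eq_loopB drivers drivers (PySem.Chars.splitOn data.toList ['\n']) [] 0 rfl]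
  simp
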